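-- pv_equiv track=rewrite | github.com/CuteBoiz/EfficientNet_Classifier | utils/utilities.py | calculate_exel_char
-- ===== SOURCE A (Python) =====
-- def calculate_exel_char(start_char, length):
-- 	'''
-- 		Caculate column character(s) of excel in order to expand the width of those column.
-- 		Args:
-- 			start_char: starting column.
-- 			length: number of columns that need to be expand width.
-- 		Return:
-- 			result: excel's column character(s).
-- 	'''
-- 	start_order = ord(start_char)
-- 	end_order = start_order + length
-- 	over = False
-- 	first_char_ord = ord('@')
-- 	while (end_order > ord('Z')):
-- 		over = True
-- 		first_char_ord += 1
-- 		end_order -= 26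
-- 	if over:
-- 		result ='{}{}'.format(chr(first_char_ord), chr(end_order))
-- 	else:
-- 		result = chr(end_order)
-- 	return result
-- ===== SOURCE B (Python) =====
-- def calculate_exel_char(start_char, length):
-- 	'''Closed-form version: the number of 26-blocks to remove is computed by one
-- 	ceiling division instead of a repeated-subtraction loop.'''
-- 	end_order = ord(start_char) + length
-- 	k = max(0, -(-(end_order - ord('Z')) // 26))
-- 	if k == 0:
-- 		return chr(end_order)
-- 	return chr(ord('@') + k) + chr(end_order - 26 * k)
-- ===== Notes on version B (the rewrite author's own statement) =====
-- stated objective: faster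
-- what changed: replaced the while-loop that repeatedly subtracts 26 with a single closed-form ceiling division computing the number of 26-blocks at once
-- outside the precondition, e.g. on calculate_exel_char('A', -200): A raises ValueError, B raises ValueError
import Mathlib
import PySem

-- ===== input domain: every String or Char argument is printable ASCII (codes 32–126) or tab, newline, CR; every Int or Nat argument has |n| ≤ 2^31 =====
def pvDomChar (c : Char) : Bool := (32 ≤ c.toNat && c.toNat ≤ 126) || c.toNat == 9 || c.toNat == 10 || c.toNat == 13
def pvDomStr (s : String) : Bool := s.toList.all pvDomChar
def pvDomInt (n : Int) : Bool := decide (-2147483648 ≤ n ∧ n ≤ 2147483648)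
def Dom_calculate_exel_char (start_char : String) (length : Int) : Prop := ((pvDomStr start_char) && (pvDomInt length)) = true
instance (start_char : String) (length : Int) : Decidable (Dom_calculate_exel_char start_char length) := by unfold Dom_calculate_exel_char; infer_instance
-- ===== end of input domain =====

-- ===== PORT A =====
-- B replaces A's repeated-subtraction while-loop by one closed-form ceiling division (faster).
-- Pre_ excludes inputs where Python raises (ord on a non-single-char string, chr of a negative
-- or too-large code) and where the result would contain a lone surrogate, which a Lean String
-- cannot represent.

-- A's while loop: while end_order > ord('Z'): ovr = True; first_char_ord += 1; end_order -= 26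
def pvLoopA (ovr : Bool) (first e : Int) : Bool × Int × Int :=
  if 90 < e then pvLoopA true (first + 1) (e - 26) else (ovr, first, e)
termination_by (e - 90).toNat
decreasing_by omega

def calculate_exel_char (start_char : String) (length : Int) : String :=
  let start_order : Int := (start_char.toList.headD '@').toNat  -- ord(start_char); Pre_ forces a single char
  let end_order : Int := start_order + length
  match pvLoopA false 64 end_order with
  | (ovr, first_char_ord, e) =>
    if ovr then String.ofList [Char.ofNat first_char_ord.toNat, Char.ofNat e.toNat]
    else String.ofList [Char.ofNat e.toNat]

-- ===== PORT B =====
def calculate_exel_char_alt (start_char : String) (length : Int) : String :=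
  let end_order : Int := (start_char.toList.headD '@').toNat + length
  let k : Int := max 0 (-(PySem.Int.floordiv (-(end_order - 90)) 26))
  if k = 0 then String.ofList [Char.ofNat end_order.toNat]
  else String.ofList [Char.ofNat (64 + k).toNat, Char.ofNat (end_order - 26 * k).toNat]

-- ===== PRECONDITION & SPEC =====
-- Pre_ excludes: start_char not a single character (Python ord raises TypeError); a negative final
-- code (chr raises ValueError); a first-character code beyond 0x10FFFF (chr raises ValueError) or in
-- the surrogate range 0xD800-0xDFFF (A returns a lone-surrogate string not representable as Lean String).
def Pre_calculate_exel_char (start_char : String) (length : Int) : Prop :=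
  start_char.toList.length = 1 ∧
  (let e : Int := (start_char.toList.headD '@').toNat + length
   (e ≤ 90 → 0 ≤ e) ∧
   (90 < e → (let k : Int := (e - 90 + 25) / 26
              64 + k ≤ 1114111 ∧ ¬(55296 ≤ 64 + k ∧ 64 + k ≤ 57343))))
instance (start_char : String) (length : Int) : Decidable (Pre_calculate_exel_char start_char length) := by unfold Pre_calculate_exel_char; infer_instance

def pvWitness_calculate_exel_char : String × Int := ("A", 30)

def Spec_calculate_exel_char (start_char : String) (length : Int) (out : String) : Prop := out = calculate_exel_char_alt start_char length
instance (start_char : String) (length : Int) (out : String) : Decidable (Spec_calculate_exel_char start_char length out) := by unfold Spec_calculate_exel_char; infer_instance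

-- ===== CLAIM (what is proved, stated in full; the proofs are below) =====
def Claim_equal_calculate_exel_char : Prop := ∀ (start_char : String) (length : Int), Dom_calculate_exel_char start_char length → Pre_calculate_exel_char start_char length → Spec_calculate_exel_char start_char length (calculate_exel_char start_char length)

-- ===== LEMMAS AND PROOFS =====
def pvK (e : Int) : Int := max 0 (-(PySem.Int.floordiv (-(e - 90)) 26))

theorem pvK_eq (e : Int) : pvK e = max 0 ((e - 90 + 25) / 26) := by
  unfold pvK
  rw [PySem.Int.floordiv_eq_ediv_of_pos (by norm_num)]
  omega

theorem pvLoopA_eq (ovr : Bool) (first e : Int) :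
    pvLoopA ovr first e = (ovr || decide (90 < e), first + pvK e, e - 26 * pvK e) := by
  fun_induction pvLoopA ovr first e with
  | case1 ovr first e h ih =>
    rw [ih]
    have h1 : pvK e = 1 + pvK (e - 26) := by rw [pvK_eq, pvK_eq]; omega
    refine Prod.ext (by simp [h]) (Prod.ext ?_ ?_) <;> simp <;> omega
  | case2 ovr first e h =>
    have h0 : pvK e = 0 := by rw [pvK_eq]; omega
    simp [h0]
    omega

-- ===== VERDICT (by name: the statement is the Claim_ definition above) =====
theorem calculate_exel_char_spec : Claim_equal_calculate_exel_char := by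
  intro start_char length _ _
  unfold Spec_calculate_exel_char calculate_exel_char calculate_exel_char_alt
  simp only [pvLoopA_eq]
  set e : Int := ((start_char.toList.headD '@').toNat : Int) + length with he
  have hL : max 0 (-(PySem.Int.floordiv (-(e - 90)) 26)) = pvK e := rfl
  rw [hL]
  by_cases h : 90 < e
  · have hk : pvK e ≠ 0 := by rw [pvK_eq]; omega
    rw [if_neg hk]
    simp only [h, decide_true, Bool.false_or, if_true]
  · have hk : pvK e = 0 := by rw [pvK_eq]; omega
    rw [if_pos hk, hk]
    simp only [h, decide_false, Bool.false_or, if_false]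
    norm_num
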